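-- pv_equiv track=rewrite | github.com/ramanaditya/data-structure-and-algorithms | leetcode/string/rearrange-spaces-between-words.py | reorderSpaces
-- ===== SOURCE A (Python) =====
-- def reorderSpaces(text: str) -> str:
--     if not text:
--         return ""
--     text_list = []
--     spaces = 0
--     temp = ""
--     for char in text:
--         if char == " ":
--             spaces += 1
--             if temp:
--                 text_list.append(temp)
--                 temp = ""
--         else:
--             temp += char
--     if temp:
--         text_list.append(temp)
--
--     if len(text_list) == 0:
--         return " " * spaces
--
--     distribute = (spaces // (len(text_list) - 1)) if len(text_list) != 1 else 0
--     last = (spaces % (len(text_list) - 1)) if len(text_list) != 1 else spaces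
--
--     res = []
--     for word in text_list:
--         if word:
--             res.append(word)
--
--     ret = (" " * distribute).join(res)
--     ret += " " * last if last else ""
--     if ret.count(" ") != spaces:
--         ret += " " * distribute
--
--     return ret
-- ===== SOURCE B (Python) =====
-- def reorderSpaces(text: str) -> str:
--     spaces = text.count(" ")
--     words = [w for w in text.split(" ") if w]
--     if not words:
--         return " " * spaces
--     if len(words) == 1:
--         return words[0] + " " * spaces
--     gap, extra = divmod(spaces, len(words) - 1)
--     return (" " * gap).join(words) + " " * extra
-- ===== Notes on version B (the rewrite author's own statement) =====
-- stated objective: simpler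
-- what changed: Replaced A's hand-written character-by-character tokenizer loop, fused space counter, dead filtering pass and dead count-repair check with two library scans (count + split-and-filter) and a single divmod-based join.
import Mathlib
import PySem

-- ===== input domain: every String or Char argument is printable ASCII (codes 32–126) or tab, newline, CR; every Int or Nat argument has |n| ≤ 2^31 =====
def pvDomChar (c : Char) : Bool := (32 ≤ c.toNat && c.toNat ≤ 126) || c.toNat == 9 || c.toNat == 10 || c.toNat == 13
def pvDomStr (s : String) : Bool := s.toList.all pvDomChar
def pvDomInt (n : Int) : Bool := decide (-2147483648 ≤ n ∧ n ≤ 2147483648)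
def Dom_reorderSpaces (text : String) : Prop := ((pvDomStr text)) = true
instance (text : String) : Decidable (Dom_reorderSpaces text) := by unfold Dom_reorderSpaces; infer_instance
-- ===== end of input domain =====

-- B replaces A's hand-written char-by-char tokenizer loop (with its dead filter pass and
-- dead count-repair check) by library count + split-and-filter and a divmod join: simpler.


-- ===== PORT A =====
-- literal transliteration of A; strings are handled as List Char (Python's += on str is
-- list append at the Chars level), the final result is repacked with String.mk
-- the body of A's 'for char in text' loop, named so the loop lemma can speak about it
def reorderSpacesStep (st : List (List Char) × Int × List Char) (char : Char) :
    List (List Char) × Int × List Char :=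
  match st with
  | (text_list, spaces, temp) =>
    if char = ' ' then
      if !temp.isEmpty then (text_list ++ [temp], spaces + 1, ([] : List Char))
      else (text_list, spaces + 1, temp)
    else (text_list, spaces, temp ++ [char])

def reorderSpaces (text : String) : String :=
  if text.toList.isEmpty then "" else
  let r := text.toList.foldl reorderSpacesStep ([], 0, [])
  match r with
  | (text_list0, spaces, temp) =>
    let text_list := if !temp.isEmpty then text_list0 ++ [temp] else text_list0
    if text_list.length = 0 then String.mk (List.replicate spaces.toNat ' ') else
    let distribute : Int :=
      if text_list.length ≠ 1 then PySem.Int.floordiv spaces ((text_list.length : Int) - 1) else 0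
    let last : Int :=
      if text_list.length ≠ 1 then PySem.Int.mod spaces ((text_list.length : Int) - 1) else spaces
    let res := text_list.foldl (fun res word => if !word.isEmpty then res ++ [word] else res) []
    let ret := PySem.Chars.join (List.replicate distribute.toNat ' ') res
    let ret := ret ++ (if last ≠ 0 then List.replicate last.toNat ' ' else [])
    let ret := if (PySem.Chars.count ret [' '] : Int) ≠ spaces then
                 ret ++ List.replicate distribute.toNat ' ' else ret
    String.mk ret

-- ===== PORT B =====
-- literal transliteration of Source B: count, split(' ') filtered, then a divmod join
def reorderSpaces_alt (text : String) : String :=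
  let spaces := PySem.Str.count text " "
  let words := (PySem.Chars.splitOn text.toList [' ']).filter (fun w => !w.isEmpty)
  if words.isEmpty then String.mk (List.replicate spaces ' ') else
  if words.length = 1 then String.mk (words.headI ++ List.replicate spaces ' ') else
  let gap := spaces / (words.length - 1)
  let extra := spaces % (words.length - 1)
  String.mk (PySem.Chars.join (List.replicate gap ' ') words ++ List.replicate extra ' ')

-- ===== PRECONDITION & SPEC =====
def Spec_reorderSpaces (text : String) (out : String) : Prop := out = reorderSpaces_alt text
instance (text : String) (out : String) : Decidable (Spec_reorderSpaces text out) := by unfold Spec_reorderSpaces; infer_instance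

-- ===== CLAIM (what is proved, stated in full; the proofs are below) =====
def Claim_equal_reorderSpaces : Prop := ∀ (text : String), Dom_reorderSpaces text → Spec_reorderSpaces text (reorderSpaces text)

-- ===== LEMMAS AND PROOFS =====

-- reference tokenization: the pieces of (temp ++ rest) delimited by ' ' (empties kept)
def pvPieces (temp : List Char) : List Char → List (List Char)
  | [] => [temp]
  | c :: cs => if c = ' ' then temp :: pvPieces [] cs else pvPieces (temp ++ [c]) cs

-- splitOn.go on the single-char separator [' '] computes pvPieces
theorem pv_go_pieces : ∀ (fuel : Nat) (l cur : List Char) (acc : List (List Char)),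
    l.length ≤ fuel →
    PySem.Chars.splitOn.go [' '] fuel l cur acc = acc.reverse ++ pvPieces cur.reverse l := by
  intro fuel
  induction fuel with
  | zero =>
    intro l cur acc h
    have : l = [] := List.eq_nil_of_length_eq_zero (Nat.le_zero.mp h)
    subst this
    simp [PySem.Chars.splitOn.go, pvPieces]
  | succ fuel ih =>
    intro l cur acc h
    cases l with
    | nil => simp [PySem.Chars.splitOn.go, pvPieces]
    | cons c rest =>
      by_cases hc : c = ' '
      · subst hc
        have : (List.isPrefixOf [' '] (' ' :: rest)) = true := by simp [List.isPrefixOf]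
        rw [PySem.Chars.splitOn.go]
        simp only [this, if_true, List.length_cons, List.length_nil, List.drop_succ_cons, List.drop_zero]
        rw [ih rest [] (cur.reverse :: acc) (by simpa using h)]
        simp [pvPieces]
      · have : (List.isPrefixOf [' '] (c :: rest)) = false := by
          simp [List.isPrefixOf]
          exact fun h => hc h.symm
        rw [PySem.Chars.splitOn.go]
        simp only [this]
        rw [if_neg (by simp)]
        rw [ih rest (c :: cur) acc (by simpa using Nat.le_of_succ_le_succ h)]
        simp [pvPieces, hc]

theorem pv_splitOn_eq_pieces (cs : List Char) :
    PySem.Chars.splitOn cs [' '] = pvPieces [] cs := by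
  unfold PySem.Chars.splitOn
  rw [pv_go_pieces (cs.length + 1) cs [] [] (by omega)]
  simp

-- count.go on the single-char pattern [' '] is List.count
theorem pv_go_count : ∀ (fuel : Nat) (l : List Char) (acc : Nat),
    l.length ≤ fuel →
    PySem.Chars.count.go [' '] fuel l acc = acc + l.count ' ' := by
  intro fuel
  induction fuel with
  | zero =>
    intro l acc h
    have : l = [] := List.eq_nil_of_length_eq_zero (Nat.le_zero.mp h)
    subst this; simp [PySem.Chars.count.go]
  | succ fuel ih =>
    intro l acc h
    cases l with
    | nil => simp [PySem.Chars.count.go]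
    | cons c rest =>
      by_cases hc : c = ' '
      · subst hc
        have hp : (List.isPrefixOf [' '] (' ' :: rest)) = true := by simp [List.isPrefixOf]
        rw [PySem.Chars.count.go]
        simp only [hp, if_true, List.length_cons, List.length_nil, List.drop_succ_cons, List.drop_zero]
        rw [ih rest (acc + 1) (by simpa using h)]
        simp [List.count_cons]
        omega
      · have hp : (List.isPrefixOf [' '] (c :: rest)) = false := by
          simp [List.isPrefixOf]
          exact fun h => hc h.symm
        rw [PySem.Chars.count.go]
        simp only [hp]
        rw [if_neg (by simp)]
        rw [ih rest acc (by simpa using Nat.le_of_succ_le_succ h)]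
        simp [hc]

theorem pv_count_space (cs : List Char) : PySem.Chars.count cs [' '] = cs.count ' ' := by
  unfold PySem.Chars.count
  rw [if_neg (by simp)]
  simpa using pv_go_count cs.length cs 0 (le_refl _)

-- A's fold computes (filter-nonempty of pvPieces, space count)
theorem pv_foldA (cs : List Char) : ∀ (tl : List (List Char)) (sp : Int) (temp : List Char),
    (cs.foldl reorderSpacesStep (tl, sp, temp)).2.1 = sp + (cs.count ' ' : Int) ∧
    (if !(cs.foldl reorderSpacesStep (tl, sp, temp)).2.2.isEmpty then
        (cs.foldl reorderSpacesStep (tl, sp, temp)).1 ++ [(cs.foldl reorderSpacesStep (tl, sp, temp)).2.2]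
      else (cs.foldl reorderSpacesStep (tl, sp, temp)).1)
      = tl ++ (pvPieces temp cs).filter (fun w => !w.isEmpty) := by
  induction cs with
  | nil =>
    intro tl sp temp
    by_cases h : temp = []
    · subst h; simp [pvPieces]
    · simp [pvPieces, List.filter, h]
  | cons c cs ih =>
    intro tl sp temp
    rw [List.foldl_cons]
    by_cases hc : c = ' '
    · subst hc
      by_cases h : temp = []
      · subst h
        have hstep : reorderSpacesStep (tl, sp, ([] : List Char)) ' ' = (tl, sp + 1, []) := rfl
        rw [hstep]
        obtain ⟨ih1, ih2⟩ := ih tl (sp + 1) []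
        refine ⟨?_, ?_⟩
        · rw [ih1]; simp; ring
        · rw [ih2]; simp [pvPieces, List.filter]
      · have hstep : reorderSpacesStep (tl, sp, temp) ' ' = (tl ++ [temp], sp + 1, []) := by
          simp [reorderSpacesStep, List.isEmpty_iff, h]
        rw [hstep]
        obtain ⟨ih1, ih2⟩ := ih (tl ++ [temp]) (sp + 1) []
        refine ⟨?_, ?_⟩
        · rw [ih1]; simp; ring
        · rw [ih2]
          simp [pvPieces, h]
    · have hstep : reorderSpacesStep (tl, sp, temp) c = (tl, sp, temp ++ [c]) := by
        simp [reorderSpacesStep, hc]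
      rw [hstep]
      obtain ⟨ih1, ih2⟩ := ih tl sp (temp ++ [c])
      refine ⟨?_, ?_⟩
      · rw [ih1]; simp [hc]
      · rw [ih2]; simp [pvPieces, hc]

-- every piece of pvPieces temp cs is space-free when temp is
theorem pv_pieces_spacefree (cs : List Char) : ∀ (temp : List Char), ' ' ∉ temp →
    ∀ w ∈ pvPieces temp cs, ' ' ∉ w := by
  induction cs with
  | nil => intro temp ht w hw; simp [pvPieces] at hw; subst hw; exact ht
  | cons c cs ih =>
    intro temp ht w hw
    by_cases hc : c = ' '
    · subst hc
      simp [pvPieces] at hw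
      rcases hw with h | h
      · subst h; exact ht
      · exact ih [] (by simp) w h
    · simp [pvPieces, hc] at hw
      refine ih (temp ++ [c]) ?_ w hw
      intro hmem
      rcases List.mem_append.mp hmem with h | h
      · exact ht h
      · simp at h; exact hc h.symm

-- the filtering pass over a list of nonempty words is the identity
theorem pv_res_eq (l : List (List Char)) (h : ∀ w ∈ l, !w.isEmpty) :
    l.foldl (fun res word => if !word.isEmpty then res ++ [word] else res) [] = l := by
  have : ∀ (acc : List (List Char)),
      l.foldl (fun res word => if !word.isEmpty then res ++ [word] else res) acc = acc ++ l := by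
    induction l with
    | nil => simp
    | cons x xs ih =>
      intro acc
      simp only [List.foldl_cons, if_pos (h x (by simp))]
      rw [ih (fun w hw => h w (by simp [hw])) (acc ++ [x])]
      simp
  simpa using this []

-- spaces in a join of space-free words with a replicate-space separator
theorem pv_count_join : ∀ (ws : List (List Char)) (g : Nat), ws ≠ [] →
    (∀ w ∈ ws, ' ' ∉ w) →
    (PySem.Chars.join (List.replicate g ' ') ws).count ' ' = (ws.length - 1) * g := by
  intro ws
  induction ws with
  | nil => intro g h; exact absurd rfl h
  | cons x xs ih =>
    intro g _ hsf
    cases xs with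
    | nil =>
      simp [PySem.Chars.join, List.intercalate]
      exact List.count_eq_zero.mpr (hsf x (by simp))
    | cons y rest =>
      have hx : (x.count ' ') = 0 := List.count_eq_zero.mpr (hsf x (by simp))
      have step : PySem.Chars.join (List.replicate g ' ') (x :: y :: rest)
          = x ++ List.replicate g ' ' ++ PySem.Chars.join (List.replicate g ' ') (y :: rest) := by
        simp [PySem.Chars.join, List.intercalate]
      rw [step]
      rw [List.count_append, List.count_append, hx,
        ih g (by simp) (fun w hw => hsf w (by simp [hw]))]
      simp [List.count_replicate]
      ring

theorem pv_main (text : String) : reorderSpaces text = reorderSpaces_alt text := by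
  have hcnt : PySem.Str.count text " " = text.toList.count ' ' := by
    have h1 : (" " : String).toList = [' '] := rfl
    rw [PySem.Str.count, h1, pv_count_space]
  unfold reorderSpaces reorderSpaces_alt
  rw [hcnt, pv_splitOn_eq_pieces]
  by_cases htext : text.toList = []
  · simp [htext, pvPieces, List.filter]
    rfl
  · rw [if_neg (by simp [htext])]
    obtain ⟨⟨tl0, sp0, temp0⟩, hr⟩ :
        ∃ x, List.foldl reorderSpacesStep ([], 0, []) text.toList = x := ⟨_, rfl⟩
    obtain ⟨hsp, hlist⟩ := pv_foldA text.toList [] 0 []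
    rw [hr] at hsp hlist ⊢
    simp only [List.nil_append] at hsp hlist
    have hsp' : sp0 = ((text.toList.count ' ' : Nat) : Int) := by omega
    subst hsp'
    have hsf : ∀ w ∈ (pvPieces [] text.toList).filter (fun w => !w.isEmpty), ' ' ∉ w := fun w hw =>
      pv_pieces_spacefree text.toList [] (by simp) w (List.mem_of_mem_filter hw)
    have hnem : ∀ w ∈ (pvPieces [] text.toList).filter (fun w => !w.isEmpty), !w.isEmpty :=
      fun w hw => (List.mem_filter.mp hw).2
    simp only []
    rw [hlist]
    cases hLc : (pvPieces [] text.toList).filter (fun w => !w.isEmpty) with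
    | nil =>
      rw [if_pos (show ([] : List (List Char)).length = 0 from rfl),
        if_pos (show ([] : List (List Char)).isEmpty = true from rfl)]
      congr 1
    | cons x xs =>
      have hxsp : ' ' ∉ x := hsf x (by rw [hLc]; simp)
      have hxc : x.count ' ' = 0 := List.count_eq_zero.mpr hxsp
      rw [if_neg (by simp)]
      rw [pv_res_eq (x :: xs) (by rw [← hLc]; exact fun w hw => hnem w (hLc ▸ hw))]
      cases xs with
      | nil =>
        -- single word
        simp only [List.length_singleton, ne_eq, not_true_eq_false, if_false]
        have hjoin : PySem.Chars.join (List.replicate (0 : Int).toNat ' ') [x] = x := by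
          simp [PySem.Chars.join, List.intercalate]
        rw [hjoin]
        have htail : (if ((text.toList.count ' ' : Nat) : Int) ≠ 0 then
              List.replicate ((text.toList.count ' ' : Nat) : Int).toNat ' ' else ([] : List Char))
            = List.replicate (text.toList.count ' ') ' ' := by
          split_ifs with h
          · simp
          · have h0 : text.toList.count ' ' = 0 := by omega
            simp [h0]
        rw [htail]
        have hc2 : PySem.Chars.count (x ++ List.replicate (text.toList.count ' ') ' ') [' ']
            = text.toList.count ' ' := by
          rw [pv_count_space]
          simp [hxc]
        rw [hc2]
        rw [if_neg (by simp)]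
        simp
      | cons y rest =>
        -- at least two words
        have hlen : (x :: y :: rest).length = rest.length + 2 := by simp
        rw [hlen]
        rw [if_pos (show rest.length + 2 ≠ 1 by omega)]
        rw [if_pos (show rest.length + 2 ≠ 1 by omega)]
        have hlen1 : ((rest.length + 2 : Nat) : Int) - 1 = ((rest.length + 1 : Nat) : Int) := by
          push_cast; ring
        rw [hlen1, PySem.Int.floordiv_natCast, PySem.Int.mod_natCast]
        simp only [Int.toNat_natCast]
        have htail : (if ((text.toList.count ' ' % (rest.length + 1) : Nat) : Int) ≠ 0 then
              List.replicate (text.toList.count ' ' % (rest.length + 1)) ' ' else ([] : List Char))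
            = List.replicate (text.toList.count ' ' % (rest.length + 1)) ' ' := by
          split_ifs with h
          · rfl
          · have h0 : text.toList.count ' ' % (rest.length + 1) = 0 := by omega
            simp [h0]
        rw [htail]
        have hcj : (PySem.Chars.join (List.replicate (text.toList.count ' ' / (rest.length + 1)) ' ')
              (x :: y :: rest)).count ' '
            = (rest.length + 1) * (text.toList.count ' ' / (rest.length + 1)) := by
          have := pv_count_join (x :: y :: rest) (text.toList.count ' ' / (rest.length + 1))
            (by simp) (fun w hw => hsf w (hLc ▸ hw))
          simpa using this
        have hc2 : PySem.Chars.count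
            (PySem.Chars.join (List.replicate (text.toList.count ' ' / (rest.length + 1)) ' ')
                (x :: y :: rest) ++
              List.replicate (text.toList.count ' ' % (rest.length + 1)) ' ') [' ']
            = text.toList.count ' ' := by
          rw [pv_count_space, List.count_append, hcj, List.count_replicate]
          exact Nat.div_add_mod _ _
        rw [hc2]
        rw [if_neg (by simp)]
        rw [if_neg (by simp), if_neg (by omega)]
        have : rest.length + 2 - 1 = rest.length + 1 := by omega
        rw [this]

-- ===== VERDICT (by name: the statement is the Claim_ definition above) =====
theorem reorderSpaces_spec : Claim_equal_reorderSpaces := by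
  intro text _
  show reorderSpaces text = reorderSpaces_alt text
  exact pv_main text
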